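-- pv_equiv track=rewrite | github.com/cptn-neemo/Word-Search-Shortcut | main.py | horizontal_check
-- ===== SOURCE A (Python) =====
-- def horizontal_check(word, board):
--     # index of place on the board
--     count = 0
--     # Go through each row in the board, then each index of the row. if the start of the word is that letter, then
--     # check if each letter to the right is in the board
--     for row in board:
--         for p in range(len(row)):
--             #Index of place in the word
--             place = 0
--             if word[place] == row[p] or word[place].lower() == row[p].lower():
--                 count = p
--                 for pl in word:
--                     #Check to see if going off of the board
--                     try:
--                         if pl == row[count] or pl.lower() == row[count].lower():
--                             count += 1
--                         else:
--                             break
--                     except: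
--                         break
--                 #Make the word uppercase
--                 else:
--                     count = p
--                     place = 0
--                     for i in range(len(word)):
--                         row[count] = word[place].upper()
--                         count += 1
--                         place += 1
--                     return board
-- ===== SOURCE B (Python) =====
-- # Simpler re-implementation: lowercase the word and each row once, find the first
-- # case-insensitive match by slice comparison, then splice the uppercased word in.
-- # Like A, it mutates the matched row of `board` in place.
-- def horizontal_check(word, board):
--     lw = [c.lower() for c in word]
--     up = [c.upper() for c in word]
--     L = len(lw)
--     for row in board:
--         lr = [cell.lower() for cell in row]
--         for p in range(len(lr) - L + 1):
--             if lr[p:p + L] == lw: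
--                 row[p:p + L] = up
--                 return board
--     return None
-- ===== Notes on version B (the rewrite author's own statement) =====
-- stated objective: simpler
-- what changed: A's three nested loops with mutable count/place cursors, try/except and for-else are replaced by a per-row scan that lowercases word and row once and compares a slice at each start, splicing in the uppercased word on the first match.
-- outside the precondition, e.g. on horizontal_check('', [[]]): A returns None, B returns [[]]
import Mathlib
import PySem

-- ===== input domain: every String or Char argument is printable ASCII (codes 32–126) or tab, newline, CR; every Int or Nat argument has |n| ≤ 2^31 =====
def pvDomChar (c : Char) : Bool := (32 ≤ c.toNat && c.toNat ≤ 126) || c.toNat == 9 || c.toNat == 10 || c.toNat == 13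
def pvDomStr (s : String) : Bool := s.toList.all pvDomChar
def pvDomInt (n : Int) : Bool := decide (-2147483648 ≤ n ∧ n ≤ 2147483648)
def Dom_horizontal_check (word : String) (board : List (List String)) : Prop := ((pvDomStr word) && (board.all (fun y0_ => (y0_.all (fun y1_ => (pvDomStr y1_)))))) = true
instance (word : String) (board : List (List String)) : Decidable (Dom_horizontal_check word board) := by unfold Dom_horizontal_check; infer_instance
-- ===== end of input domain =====

-- B replaces A's three nested loops with counters/try/except/for-else by a per-row
-- lowercase-once slice scan (simpler, same complexity). Equivalence is about the
-- RETURN value; both Pythons also mutate the matched row of `board` in place.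

-- ===== PORT A =====
-- word[place] == row[p] or word[place].lower() == row[p].lower()  (pl is a 1-char string)
def pvChEq (c : Char) (cell : String) : Bool :=
  String.singleton c == cell || PySem.Str.lower (String.singleton c) == PySem.Str.lower cell

-- the try/for/else loop: matches word chars against row[count], row[count+1], …
-- (IndexError → caught → break → false)
def pvAInner : List Char → List String → Nat → Bool
  | [], _, _ => true
  | c :: cs, row, count =>
    match row[count]? with
    | none => false
    | some cell => if pvChEq c cell then pvAInner cs row (count + 1) else false

-- the uppercasing loop: row[count] = word[place].upper(); count += 1; place += 1
def pvAWrite : List Char → List String → Nat → List String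
  | [], row, _ => row
  | c :: cs, row, count => pvAWrite cs (row.set count (PySem.Str.upper (String.singleton c))) (count + 1)

-- the `for p in range(len(row))` loop of A (fuel only makes it structural; it is
-- called with fuel = row.length, enough to cover the whole range)
def pvARowGo (w : List Char) (row : List String) : Nat → Nat → Option (List String)
  | 0, _ => none
  | fuel + 1, p =>
    if h : p < row.length then
      match w.head? with
      | none => pvARowGo w row fuel (p + 1)  -- word[0] raises IndexError in Python; outside Pre_
      | some c0 =>
        if pvChEq c0 row[p] then
          if pvAInner w row p then some (pvAWrite w row p) else pvARowGo w row fuel (p + 1)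
        else pvARowGo w row fuel (p + 1)
    else none

-- the `for row in board` loop of A (returns the whole board on success)
def pvARows (w : List Char) : List (List String) → Option (List (List String))
  | [] => none
  | row :: rest =>
    match pvARowGo w row row.length 0 with
    | some newRow => some (newRow :: rest)
    | none =>
      match pvARows w rest with
      | some rs => some (row :: rs)
      | none => none

def horizontal_check (word : String) (board : List (List String)) : Option (List (List String)) :=
  pvARows word.toList board

-- ===== PORT B =====
def pvLowChar (c : Char) : String := PySem.Str.lower (String.singleton c)
def pvUpChar (c : Char) : String := PySem.Str.upper (String.singleton c)

-- `for p in range(len(lr) - L + 1): if lr[p:p+L] == lw: return p`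
-- (fuel only makes the loop structural; lr.length + 1 covers the whole range)
def pvBScanGo (lw lr : List String) : Nat → Nat → Option Nat
  | 0, _ => none
  | fuel + 1, p =>
    if p + lw.length ≤ lr.length then
      if (lr.drop p).take lw.length = lw then some p else pvBScanGo lw lr fuel (p + 1)
    else none

def pvBScan (lw lr : List String) : Option Nat := pvBScanGo lw lr (lr.length + 1) 0

-- `for row in board` of B; on a match splice in `up` (row[p:p+L] = up)
def pvBRows (lw up : List String) (L : Nat) : List (List String) → Option (List (List String))
  | [] => none
  | row :: rest =>
    match pvBScan lw (row.map PySem.Str.lower) with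
    | some p => some ((row.take p ++ up ++ row.drop (p + L)) :: rest)
    | none => (pvBRows lw up L rest).map (row :: ·)

def horizontal_check_alt (word : String) (board : List (List String)) : Option (List (List String)) :=
  let w := word.toList
  let lw := w.map pvLowChar
  let up := w.map pvUpChar
  pvBRows lw up lw.length board

-- ===== PRECONDITION & SPEC =====
-- Pre_ excludes only the empty word: there A raises IndexError at word[0] as soon
-- as some row is nonempty (and returns None when every row is empty, where B,
-- matching the empty word trivially, returns the board).
def Pre_horizontal_check (word : String) (board : List (List String)) : Prop := word ≠ ""
instance (word : String) (board : List (List String)) : Decidable (Pre_horizontal_check word board) := by unfold Pre_horizontal_check; infer_instance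
def pvWitness_horizontal_check : String × List (List String) := ("cat", [["x", "C", "a", "T"], ["c"]])

def Spec_horizontal_check (word : String) (board : List (List String)) (out : Option (List (List String))) : Prop := out = horizontal_check_alt word board
instance (word : String) (board : List (List String)) (out : Option (List (List String))) : Decidable (Spec_horizontal_check word board out) := by unfold Spec_horizontal_check; infer_instance

-- ===== CLAIM (what is proved, stated in full; the proofs are below) =====
def Claim_equal_horizontal_check : Prop := ∀ (word : String) (board : List (List String)), Dom_horizontal_check word board → Pre_horizontal_check word board → Spec_horizontal_check word board (horizontal_check word board)

-- ===== LEMMAS AND PROOFS =====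

-- A's two-sided case-insensitive cell test is just equality of lowered values
theorem pvChEq_iff (c : Char) (cell : String) :
    pvChEq c cell = true ↔ PySem.Str.lower cell = pvLowChar c := by
  simp only [pvChEq, pvLowChar, Bool.or_eq_true, beq_iff_eq]
  constructor
  · rintro (rfl | h)
    · rfl
    · exact h.symm
  · intro h; exact Or.inr h.symm

-- A's inner matching loop succeeds exactly on a lowered-slice equality
theorem pvAInner_iff (w : List Char) (row : List String) (p : Nat) :
    pvAInner w row p = true ↔
      ((row.map PySem.Str.lower).drop p).take w.length = w.map pvLowChar := by
  induction w generalizing p with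
  | nil => simp [pvAInner]
  | cons c cs ih =>
    by_cases hp : p < row.length
    · have hp' : p < (row.map PySem.Str.lower).length := by simpa using hp
      rw [List.drop_eq_getElem_cons hp']
      simp only [pvAInner, List.getElem?_eq_getElem hp, List.length_cons, List.take_succ_cons,
        List.map_cons, List.getElem_map]
      by_cases hc : pvChEq c row[p] = true
      · rw [if_pos hc]
        rw [pvChEq_iff] at hc
        rw [ih]
        constructor
        · intro h; rw [hc, h]
        · intro h; exact (List.cons_eq_cons.mp h).2
      · rw [if_neg hc]
        rw [pvChEq_iff] at hc
        simp only [Bool.false_eq_true, false_iff]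
        intro hEq
        injection hEq with h1 _
        exact hc h1
    · have hnil : (row.map PySem.Str.lower).drop p = [] :=
        List.drop_eq_nil_of_le (by simpa using Nat.le_of_not_lt hp)
      simp [pvAInner, List.getElem?_eq_none (Nat.le_of_not_lt hp), hnil]

-- A's uppercasing loop is a splice
theorem pvAWrite_eq (w : List Char) (row : List String) (p : Nat)
    (h : p + w.length ≤ row.length) :
    pvAWrite w row p = row.take p ++ w.map pvUpChar ++ row.drop (p + w.length) := by
  induction w generalizing row p with
  | nil => simp [pvAWrite]
  | cons c cs ih =>
    have hp : p < row.length := by simp at h; omega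
    rw [pvAWrite, ih _ (p + 1) (by rw [List.length_set]; simp at h; omega)]
    rw [List.set_eq_take_cons_drop _ hp, List.take_append, List.drop_append]
    have hl : (row.take p).length = p := by rw [List.length_take]; omega
    rw [List.take_of_length_le (show (row.take p).length ≤ p + 1 by omega),
      List.drop_of_length_le (show (row.take p).length ≤ p + 1 + cs.length by omega), hl]
    have e1 : p + 1 - p = 1 := by omega
    have e2 : p + 1 + cs.length - p = cs.length + 1 := by omega
    rw [e1, e2]
    have e3 : cs.length + (p + 1) = p + (cs.length + 1) := by omega
    simp [List.drop_drop, pvUpChar]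
    omega

-- the two row scans agree (given enough fuel on both sides)
theorem pvScanGo_eq (w : List Char) (hw : w ≠ []) (row : List String) :
    ∀ fuel fuel' p, row.length ≤ fuel + p → row.length + 1 ≤ fuel' + p →
    pvARowGo w row fuel p =
      (pvBScanGo (w.map pvLowChar) (row.map PySem.Str.lower) fuel' p).map
        (fun q => row.take q ++ w.map pvUpChar ++ row.drop (q + w.length)) := by
  obtain ⟨c0, cs, rfl⟩ := List.exists_cons_of_ne_nil hw
  intro fuel
  induction fuel with
  | zero =>
    intro fuel' p hA hB
    -- p ≥ row.length: A is out of range; B's window p + |w| ≤ row.length fails (|w| ≥ 1)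
    rw [pvARowGo]
    cases fuel' with
    | zero => rfl
    | succ f =>
      rw [pvBScanGo, if_neg (by simp; omega)]
      rfl
  | succ fuel ih =>
    intro fuel' p hA hB
    by_cases hp : p < row.length
    · obtain ⟨f, rfl⟩ : ∃ f, fuel' = f + 1 := ⟨fuel' - 1, by omega⟩
      rw [pvARowGo, dif_pos hp, pvBScanGo]
      simp only [List.length_map, List.head?_cons]
      by_cases hM : ((row.map PySem.Str.lower).drop p).take (c0 :: cs).length
          = (c0 :: cs).map pvLowChar
      · -- full match at p: A's first-char test and inner loop both succeed
        have hlen : p + (c0 :: cs).length ≤ row.length := by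
          have := congrArg List.length hM
          simp only [List.length_take, List.length_drop, List.length_map] at this
          omega
        have hc0 : pvChEq c0 row[p] = true := by
          rw [pvChEq_iff]
          have hp' : p < (row.map PySem.Str.lower).length := by simpa using hp
          rw [List.drop_eq_getElem_cons hp', List.length_cons, List.take_succ_cons,
            List.map_cons] at hM
          injection hM with h1 _
          simpa using h1
        have hInner : pvAInner (c0 :: cs) row p = true := (pvAInner_iff _ row p).mpr hM
        rw [if_pos hc0, if_pos hInner, if_pos (by simpa using hlen), if_pos hM]
        simp [pvAWrite_eq _ _ _ hlen]
      · -- no match at p: both sides move on to p + 1 (B may stop; then A finds nothing either)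
        have hInner : ¬ pvAInner (c0 :: cs) row p = true :=
          fun h => hM ((pvAInner_iff _ row p).mp h)
        have hstep := ih f (p + 1) (by omega) (by omega)
        have hA' : (if pvChEq c0 row[p] = true then
              if pvAInner (c0 :: cs) row p = true then some (pvAWrite (c0 :: cs) row p)
              else pvARowGo (c0 :: cs) row fuel (p + 1)
            else pvARowGo (c0 :: cs) row fuel (p + 1)) = pvARowGo (c0 :: cs) row fuel (p + 1) := by
          by_cases hc : pvChEq c0 row[p] = true
          · rw [if_pos hc, if_neg hInner]
          · rw [if_neg hc]
        rw [hA', hstep]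
        by_cases hr : p + cs.length + 1 ≤ row.length
        · rw [if_pos (by simp; omega), if_neg hM]
        · -- B's window already ran out: its remaining scan returns none, and so does A's
          rw [if_neg (by simp; omega)]
          cases f with
          | zero => rfl
          | succ f' =>
            rw [pvBScanGo, if_neg (by simp; omega)]
    · rw [pvARowGo, dif_neg hp]
      cases fuel' with
      | zero => rfl
      | succ f =>
        rw [pvBScanGo, if_neg (by simp; omega)]
        rfl

-- the two board loops agree
theorem pvRows_eq (w : List Char) (hw : w ≠ []) (board : List (List String)) :
    pvARows w board =
      pvBRows (w.map pvLowChar) (w.map pvUpChar) (w.map pvLowChar).length board := by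
  induction board with
  | nil => rfl
  | cons row rest ih =>
    rw [pvARows, pvBRows, pvBScan]
    have hlr : (row.map PySem.Str.lower).length = row.length := by simp
    have hscan := pvScanGo_eq w hw row row.length ((row.map PySem.Str.lower).length + 1) 0
      (by omega) (by omega)
    rw [hscan]
    cases pvBScanGo (w.map pvLowChar) (row.map PySem.Str.lower)
        ((row.map PySem.Str.lower).length + 1) 0 with
    | none =>
      rw [ih]
      cases pvBRows (w.map pvLowChar) (w.map pvUpChar) (w.map pvLowChar).length rest <;> rfl
    | some q => simp

-- ===== VERDICT (by name: the statement is the Claim_ definition above) =====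
theorem horizontal_check_spec : Claim_equal_horizontal_check := by
  intro word board _ hpre
  unfold Spec_horizontal_check horizontal_check horizontal_check_alt
  exact pvRows_eq word.toList (by simpa using hpre) board
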